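-- pv_equiv track=rewrite | github.com/Grinnling/Holistic-Transparency-Memory-Engine | memory_system/core/advanced_orchestration_functions.py | _find_related_concepts
-- ===== SOURCE A (Python) =====
-- def _find_related_concepts(text, key_concepts):
--     """Find concepts from key_concepts that appear in the text"""
--     text_lower = text.lower()
--     related = []
--
--     for category, concepts in key_concepts.items():
--         for concept in concepts:
--             if concept.lower() in text_lower:
--                 related.append(concept)
--
--     return related
-- ===== SOURCE B (Python) =====
-- def _find_related_concepts(text, key_concepts):
--     """Find concepts from key_concepts that appear in the text.
--
--     Different algorithm: index the text once -- a hash set of every substring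
--     of the text whose length is one of the (distinct) concept lengths -- then
--     each concept is a single set lookup instead of a substring scan."""
--     text_lower = text.lower()
--     lengths = {len(c.lower()) for cs in key_concepts.values() for c in cs}
--     subs = {text_lower[i:i + L]
--             for L in lengths
--             for i in range(len(text_lower) - L + 1)}
--     return [c for cs in key_concepts.values() for c in cs
--             if c.lower() in subs]
-- ===== Notes on version B (the rewrite author's own statement) =====
-- stated objective: faster
-- what changed: B builds one hash set of all lowered-text substrings whose lengths occur among the concepts and answers each concept by a single set lookup, replacing A's per-concept built-in substring scan of the text.
import Mathlib
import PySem

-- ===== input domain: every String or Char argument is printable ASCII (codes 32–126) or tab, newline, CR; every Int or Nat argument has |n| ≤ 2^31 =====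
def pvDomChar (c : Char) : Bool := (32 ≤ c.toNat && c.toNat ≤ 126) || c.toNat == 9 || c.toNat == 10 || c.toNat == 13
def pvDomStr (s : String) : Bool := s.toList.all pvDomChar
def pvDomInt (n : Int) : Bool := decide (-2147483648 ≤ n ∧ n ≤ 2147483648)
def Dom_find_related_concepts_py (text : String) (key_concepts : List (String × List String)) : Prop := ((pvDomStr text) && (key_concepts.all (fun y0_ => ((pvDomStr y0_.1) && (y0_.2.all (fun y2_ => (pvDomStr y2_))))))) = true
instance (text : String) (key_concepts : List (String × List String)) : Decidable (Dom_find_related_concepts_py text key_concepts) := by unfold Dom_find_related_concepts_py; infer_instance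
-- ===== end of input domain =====

-- ===== PORT A =====
def find_related_concepts_py (text : String) (key_concepts : List (String × List String)) : List String :=
  let text_lower := PySem.Str.lower text
  let related : List String := []
  let related := key_concepts.foldl (fun related p =>
    p.2.foldl (fun related concept =>
      if PySem.Str.isIn (PySem.Str.lower concept) text_lower then related ++ [concept]
      else related) related) related
  related

-- ===== PORT B =====
-- Source B indexes the lowered text once: a set of every substring whose length is a
-- (distinct) concept length; each concept then is one set lookup.
-- {text_lower[i:i+L] for i in range(len(text_lower) - L + 1)} for one L:
def pvSlices (tl : List Char) (L : Nat) : List (List Char) :=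
  (List.range (tl.length + 1 - L)).map (fun i =>
    PySem.List.slice tl (some (Int.ofNat i)) (some (Int.ofNat (i + L))))

def find_related_concepts_py_alt (text : String) (key_concepts : List (String × List String)) : List String :=
  let text_lower := PySem.Chars.lower text.toList
  let lengths : PySem.Set Nat := PySem.Set.ofList
    (key_concepts.flatMap (fun p => p.2.map (fun c => (PySem.Chars.lower c.toList).length)))
  let subs : PySem.Set (List Char) := PySem.Set.ofList
    (lengths.flatMap (fun L => pvSlices text_lower L))
  key_concepts.flatMap (fun p =>
    p.2.filter (fun c => subs.contains (PySem.Chars.lower c.toList)))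

-- ===== PRECONDITION & SPEC =====
def Spec_find_related_concepts_py (text : String) (key_concepts : List (String × List String)) (out : List String) : Prop := out = find_related_concepts_py_alt text key_concepts
instance (text : String) (key_concepts : List (String × List String)) (out : List String) : Decidable (Spec_find_related_concepts_py text key_concepts out) := by unfold Spec_find_related_concepts_py; infer_instance

-- ===== CLAIM (what is proved, stated in full; the proofs are below) =====
def Claim_equal_find_related_concepts_py : Prop := ∀ (text : String) (key_concepts : List (String × List String)), Dom_find_related_concepts_py text key_concepts → Spec_find_related_concepts_py text key_concepts (find_related_concepts_py text key_concepts)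

-- ===== LEMMAS AND PROOFS =====
theorem pv_foldl_filter (P : String → Bool) (l : List String) (acc : List String) :
    l.foldl (fun r c => if P c then r ++ [c] else r) acc = acc ++ l.filter P := by
  induction l generalizing acc with
  | nil => simp
  | cons c t ih =>
    by_cases h : P c = true <;> simp [h, ih]

theorem pv_nested_foldl (P : String → Bool) (kcs : List (String × List String))
    (acc : List String) :
    kcs.foldl (fun r p => p.2.foldl (fun r c => if P c then r ++ [c] else r) r) acc
      = acc ++ kcs.flatMap (fun p => p.2.filter P) := by
  induction kcs generalizing acc with
  | nil => simp
  | cons p rest ih =>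
    rw [List.foldl_cons, pv_foldl_filter, ih, List.flatMap_cons, List.append_assoc]

theorem mem_pvSlices_iff (tl n : List Char) (lens : List Nat) (hL : n.length ∈ lens) :
    n ∈ lens.flatMap (fun L => pvSlices tl L) ↔ n <:+: tl := by
  simp only [List.mem_flatMap, pvSlices, List.mem_map, List.mem_range,
    Int.ofNat_eq_natCast, PySem.List.slice_natCast]
  constructor
  · rintro ⟨L, _, i, _, rfl⟩
    exact List.infix_iff_prefix_suffix.mpr
      ⟨tl.drop i, List.take_prefix _ _, List.drop_suffix _ _⟩
  · intro h
    obtain ⟨s, t, rfl⟩ := h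
    refine ⟨n.length, hL, s.length, by simp; omega, ?_⟩
    have h1 : s.length + n.length - s.length = n.length := by omega
    rw [h1, List.append_assoc, List.drop_left]
    simp

theorem pv_filter_congr {kcs : List (String × List String)}
    (P Q : String → Bool)
    (h : ∀ p ∈ kcs, ∀ c ∈ p.2, P c = Q c) :
    kcs.flatMap (fun p => p.2.filter P) = kcs.flatMap (fun p => p.2.filter Q) := by
  induction kcs with
  | nil => rfl
  | cons p rest ih =>
    rw [List.flatMap_cons, List.flatMap_cons,
      List.filter_congr (h p (List.mem_cons_self)),
      ih (fun q hq c hc => h q (List.mem_cons_of_mem _ hq) c hc)]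

-- ===== VERDICT (by name: the statement is the Claim_ definition above) =====
theorem find_related_concepts_py_spec : Claim_equal_find_related_concepts_py := by
  intro text key_concepts _
  unfold Spec_find_related_concepts_py find_related_concepts_py find_related_concepts_py_alt
  dsimp only
  rw [pv_nested_foldl (fun concept =>
        PySem.Str.isIn (PySem.Str.lower concept) (PySem.Str.lower text))
      key_concepts [] |>.trans (List.nil_append _)]
  apply pv_filter_congr
  intro p hp c hc
  rw [Bool.eq_iff_iff, PySem.Str.isIn_eq, PySem.Chars.isIn_iff_infix,
    PySem.Str.toList_lower, PySem.Str.toList_lower, PySem.Set.contains_iff,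
    PySem.Set.mem_ofList]
  have hL : (PySem.Chars.lower c.toList).length ∈
      (PySem.Set.ofList (key_concepts.flatMap
        (fun p => p.2.map (fun c => (PySem.Chars.lower c.toList).length))) : List Nat) := by
    rw [PySem.Set.mem_ofList]
    exact List.mem_flatMap.mpr ⟨p, hp, List.mem_map.mpr ⟨c, hc, rfl⟩⟩
  exact (mem_pvSlices_iff _ _ _ hL).symm
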